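-- pv_equiv track=rewrite | github.com/toxirin1999/gym-django-app | entrenos/services/evaluacion_profesional_service.py | _generar_resumen_volumen
-- ===== SOURCE A (Python) =====
-- def _generar_resumen_volumen(evaluaciones, puntuacion):
--     """Genera un resumen textual de la evaluación de volumen."""
--     suboptimos = [e['grupo'] for e in evaluaciones if e['estado'] == 'suboptimo']
--     excesivos = [e['grupo'] for e in evaluaciones if e['estado'] == 'excesivo']
--     optimos = [e['grupo'] for e in evaluaciones if e['estado'] == 'optimo']
--
--     if puntuacion >= 80:
--         base = "Tu distribución de volumen está bien equilibrada."
--     elif puntuacion >= 60: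
--         base = "Tu volumen general es aceptable pero hay margen de mejora."
--     else:
--         base = "Tu volumen de entrenamiento necesita ajustes significativos."
--
--     detalles = []
--     if suboptimos:
--         detalles.append(f"Grupos con volumen insuficiente: {', '.join(suboptimos)}.")
--     if excesivos:
--         detalles.append(f"Grupos con volumen excesivo: {', '.join(excesivos)}.")
--     if optimos:
--         detalles.append(f"Grupos en rango óptimo: {', '.join(optimos)}.")
--
--     return base + " " + " ".join(detalles)
-- ===== SOURCE B (Python) =====
-- ORDEN = (
--     ('suboptimo', 'Grupos con volumen insuficiente: '),
--     ('excesivo', 'Grupos con volumen excesivo: '),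
--     ('optimo', 'Grupos en rango óptimo: '),
-- )
--
--
-- def _generar_resumen_volumen(evaluaciones, puntuacion):
--     """Resumen textual de la evaluación de volumen (una sola pasada de agrupación)."""
--     grupos = {}
--     for e in evaluaciones:
--         estado = e['estado']
--         if estado in ('suboptimo', 'excesivo', 'optimo'):
--             grupos.setdefault(estado, []).append(e['grupo'])
--
--     if puntuacion >= 80:
--         base = "Tu distribución de volumen está bien equilibrada."
--     elif puntuacion >= 60:
--         base = "Tu volumen general es aceptable pero hay margen de mejora."
--     else:
--         base = "Tu volumen de entrenamiento necesita ajustes significativos."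
--
--     detalles = [prefijo + ', '.join(grupos[estado]) + '.'
--                 for estado, prefijo in ORDEN if estado in grupos]
--     return base + " " + " ".join(detalles)
-- ===== Notes on version B (the rewrite author's own statement) =====
-- stated objective: alternative
-- what changed: Replaces A's three separate filter passes over evaluaciones and three hard-coded append branches by a single grouping pass into a dict keyed by estado plus a data-driven iteration over an ordered (estado, prefix) template table.
import Mathlib
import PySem

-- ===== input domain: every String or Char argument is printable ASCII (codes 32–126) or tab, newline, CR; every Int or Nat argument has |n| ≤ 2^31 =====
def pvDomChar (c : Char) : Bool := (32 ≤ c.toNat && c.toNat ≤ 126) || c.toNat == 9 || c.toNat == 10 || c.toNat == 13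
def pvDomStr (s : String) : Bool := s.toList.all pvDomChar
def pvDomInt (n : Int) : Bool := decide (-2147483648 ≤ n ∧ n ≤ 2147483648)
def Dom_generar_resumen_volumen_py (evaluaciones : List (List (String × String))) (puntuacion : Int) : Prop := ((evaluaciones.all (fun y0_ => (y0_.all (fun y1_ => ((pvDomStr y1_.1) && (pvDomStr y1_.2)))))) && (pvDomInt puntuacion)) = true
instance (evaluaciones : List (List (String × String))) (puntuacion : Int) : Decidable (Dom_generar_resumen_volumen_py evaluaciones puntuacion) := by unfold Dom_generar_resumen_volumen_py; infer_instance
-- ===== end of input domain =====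

-- B replaces A's three filtering passes over `evaluaciones` by a single grouping pass into a
-- dict plus a table of (estado, prefix) templates; same return value, return-value equivalence only.

-- ===== PORT A =====
-- shared lookup helper: e['k'] on the dict e; under Pre_ the key is present, so getD "" is exact
def pvLook (e : List (String × String)) (k : String) : String :=
  ((PySem.Dict.mk e).get? k).getD ""

def generar_resumen_volumen_py (evaluaciones : List (List (String × String))) (puntuacion : Int) : String :=
  let suboptimos := (evaluaciones.filter (fun e => pvLook e "estado" == "suboptimo")).map (fun e => pvLook e "grupo")
  let excesivos := (evaluaciones.filter (fun e => pvLook e "estado" == "excesivo")).map (fun e => pvLook e "grupo")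
  let optimos := (evaluaciones.filter (fun e => pvLook e "estado" == "optimo")).map (fun e => pvLook e "grupo")
  let base :=
    if puntuacion ≥ 80 then "Tu distribución de volumen está bien equilibrada."
    else if puntuacion ≥ 60 then "Tu volumen general es aceptable pero hay margen de mejora."
    else "Tu volumen de entrenamiento necesita ajustes significativos."
  let detalles : List String := []
  let detalles := if suboptimos.isEmpty then detalles else detalles ++ ["Grupos con volumen insuficiente: " ++ PySem.Str.join ", " suboptimos ++ "."]
  let detalles := if excesivos.isEmpty then detalles else detalles ++ ["Grupos con volumen excesivo: " ++ PySem.Str.join ", " excesivos ++ "."]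
  let detalles := if optimos.isEmpty then detalles else detalles ++ ["Grupos en rango óptimo: " ++ PySem.Str.join ", " optimos ++ "."]
  base ++ " " ++ PySem.Str.join " " detalles

-- ===== PORT B =====
def pvOrden : List (String × String) :=
  [("suboptimo", "Grupos con volumen insuficiente: "),
   ("excesivo", "Grupos con volumen excesivo: "),
   ("optimo", "Grupos en rango óptimo: ")]

def generar_resumen_volumen_py_alt (evaluaciones : List (List (String × String))) (puntuacion : Int) : String :=
  let grupos := evaluaciones.foldl (fun d e =>
      let estado := pvLook e "estado"
      if estado ∈ (["suboptimo", "excesivo", "optimo"] : List String) then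
        d.modify estado [] (· ++ [pvLook e "grupo"])
      else d) PySem.Dict.empty
  let base :=
    if puntuacion ≥ 80 then "Tu distribución de volumen está bien equilibrada."
    else if puntuacion ≥ 60 then "Tu volumen general es aceptable pero hay margen de mejora."
    else "Tu volumen de entrenamiento necesita ajustes significativos."
  let detalles := pvOrden.filterMap (fun p =>
    if grupos.contains p.1 then some (p.2 ++ PySem.Str.join ", " (grupos.getD p.1 []) ++ ".") else none)
  base ++ " " ++ PySem.Str.join " " detalles

-- ===== PRECONDITION & SPEC =====
-- Pre_ excludes exactly the inputs where the Python raises KeyError: a dict without an 'estado'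
-- key, or with one of the three grouped estados but no 'grupo' key (both programs raise there).
def Pre_generar_resumen_volumen_py (evaluaciones : List (List (String × String))) (puntuacion : Int) : Prop :=
  ∀ e ∈ evaluaciones, ((PySem.Dict.mk e).get? "estado").isSome ∧
    (pvLook e "estado" ∈ (["suboptimo", "excesivo", "optimo"] : List String) →
      ((PySem.Dict.mk e).get? "grupo").isSome)
instance (evaluaciones : List (List (String × String))) (puntuacion : Int) : Decidable (Pre_generar_resumen_volumen_py evaluaciones puntuacion) := by unfold Pre_generar_resumen_volumen_py; infer_instance
def pvWitness_generar_resumen_volumen_py : (List (List (String × String))) × Int :=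
  ([[("estado", "suboptimo"), ("grupo", "pecho")], [("estado", "optimo"), ("grupo", "espalda")]], 70)

def Spec_generar_resumen_volumen_py (evaluaciones : List (List (String × String))) (puntuacion : Int) (out : String) : Prop := out = generar_resumen_volumen_py_alt evaluaciones puntuacion
instance (evaluaciones : List (List (String × String))) (puntuacion : Int) (out : String) : Decidable (Spec_generar_resumen_volumen_py evaluaciones puntuacion out) := by unfold Spec_generar_resumen_volumen_py; infer_instance

-- ===== CLAIM (what is proved, stated in full; the proofs are below) =====
def Claim_equal_generar_resumen_volumen_py : Prop := ∀ (evaluaciones : List (List (String × String))) (puntuacion : Int), Dom_generar_resumen_volumen_py evaluaciones puntuacion → Pre_generar_resumen_volumen_py evaluaciones puntuacion → Spec_generar_resumen_volumen_py evaluaciones puntuacion (generar_resumen_volumen_py evaluaciones puntuacion)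

-- ===== LEMMAS AND PROOFS =====

-- the grouping fold, named so the lemmas can speak about it
def pvStep (d : PySem.Dict String (List String)) (e : List (String × String)) : PySem.Dict String (List String) :=
  let estado := pvLook e "estado"
  if estado ∈ (["suboptimo", "excesivo", "optimo"] : List String) then
    d.modify estado [] (· ++ [pvLook e "grupo"])
  else d

theorem pv_getD_fold (evs : List (List (String × String))) (c : String)
    (hc : c ∈ (["suboptimo", "excesivo", "optimo"] : List String))
    (d : PySem.Dict String (List String)) :
    (evs.foldl pvStep d).getD c [] =
      d.getD c [] ++ (evs.filter (fun e => pvLook e "estado" == c)).map (fun e => pvLook e "grupo") := by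
  have hc' : c = "suboptimo" ∨ c = "excesivo" ∨ c = "optimo" := by simpa using hc
  induction evs generalizing d with
  | nil => simp
  | cons e rest ih =>
    simp only [List.foldl_cons, List.filter_cons]
    by_cases h : pvLook e "estado" = c
    · simp [pvStep, h, hc', ih]
    · by_cases hm : pvLook e "estado" ∈ (["suboptimo", "excesivo", "optimo"] : List String)
      · simp [pvStep, hm, h, ih, PySem.Dict.getD_modify, Ne.symm h]
      · simp [pvStep, hm, h, ih]

theorem pv_contains_fold (evs : List (List (String × String))) (c : String)
    (hc : c ∈ (["suboptimo", "excesivo", "optimo"] : List String))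
    (d : PySem.Dict String (List String)) :
    (evs.foldl pvStep d).contains c =
      (d.contains c || evs.any (fun e => pvLook e "estado" == c)) := by
  have hc' : c = "suboptimo" ∨ c = "excesivo" ∨ c = "optimo" := by simpa using hc
  induction evs generalizing d with
  | nil => simp
  | cons e rest ih =>
    simp only [List.foldl_cons, List.any_cons]
    by_cases h : pvLook e "estado" = c
    · simp [pvStep, h, hc', ih, PySem.Dict.contains_modify]
    · have hb : (c == pvLook e "estado") = false := by simp [Ne.symm h]
      have hb' : (pvLook e "estado" == c) = false := by simp [h]
      by_cases hm : pvLook e "estado" ∈ (["suboptimo", "excesivo", "optimo"] : List String)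
      · simp [pvStep, hm, ih, PySem.Dict.contains_modify, hb, hb']
      · simp [pvStep, hm, ih, hb']

theorem pv_filter_isEmpty (evs : List (List (String × String))) (c : String) :
    (evs.filter (fun e => pvLook e "estado" == c)).isEmpty =
      !(evs.any (fun e => pvLook e "estado" == c)) := by
  induction evs with
  | nil => rfl
  | cons e rest ih =>
    by_cases h : pvLook e "estado" = c <;> simp [h, ih]

-- ===== VERDICT (by name: the statement is the Claim_ definition above) =====
theorem generar_resumen_volumen_py_spec : Claim_equal_generar_resumen_volumen_py := by
  intro evs p _ _
  show _ = _
  unfold generar_resumen_volumen_py generar_resumen_volumen_py_alt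
  have hfold : ∀ (d : PySem.Dict String (List String)),
      evs.foldl (fun d e =>
        if pvLook e "estado" ∈ (["suboptimo", "excesivo", "optimo"] : List String) then
          d.modify (pvLook e "estado") [] (· ++ [pvLook e "grupo"]) else d) d = evs.foldl pvStep d := by
    intro d; rfl
  simp only [hfold, pvOrden, List.filterMap_cons, List.filterMap_nil]
  rw [pv_getD_fold evs "suboptimo" (by simp) _, pv_getD_fold evs "excesivo" (by simp) _,
      pv_getD_fold evs "optimo" (by simp) _,
      pv_contains_fold evs "suboptimo" (by simp) _, pv_contains_fold evs "excesivo" (by simp) _,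
      pv_contains_fold evs "optimo" (by simp) _]
  by_cases h1 : evs.any (fun e => pvLook e "estado" == "suboptimo") <;>
    by_cases h2 : evs.any (fun e => pvLook e "estado" == "excesivo") <;>
      by_cases h3 : evs.any (fun e => pvLook e "estado" == "optimo") <;>
        simp [pv_filter_isEmpty, h1, h2, h3]
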